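-- pv_equiv track=rewrite | github.com/TheoLee021/LeetCode | StringManipulations2.py | special_order
-- ===== SOURCE A (Python) =====
-- def special_order(inputString):
--     result = ''
--     l = 0
--     r = len(inputString) - 1
--
--     while r >= len(inputString) // 2:
--         result += inputString[r]
--         r -= 1
--
--     while l <= r:
--         result += inputString[l]
--         l += 1
--
--     return result
-- ===== SOURCE B (Python) =====
-- def special_order(inputString):
--     mid = len(inputString) // 2
--     return inputString[mid:][::-1] + inputString[:mid]
-- ===== Notes on version B (the rewrite author's own statement) =====
-- stated objective: faster
-- what changed: Replaces the two index-walking while loops with repeated string concatenation by a single closed-form slice expression: reversed second half concatenated with the first half.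
import Mathlib
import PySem

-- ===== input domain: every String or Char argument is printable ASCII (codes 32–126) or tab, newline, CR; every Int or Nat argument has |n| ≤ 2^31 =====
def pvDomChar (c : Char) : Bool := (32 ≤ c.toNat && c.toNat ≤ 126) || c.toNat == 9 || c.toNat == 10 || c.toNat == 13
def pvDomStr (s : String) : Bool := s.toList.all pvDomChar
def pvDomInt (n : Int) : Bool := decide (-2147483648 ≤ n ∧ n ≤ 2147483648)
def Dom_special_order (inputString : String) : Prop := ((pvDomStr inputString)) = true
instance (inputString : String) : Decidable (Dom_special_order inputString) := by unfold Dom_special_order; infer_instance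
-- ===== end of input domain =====

-- B replaces A's two index-walking while loops by the closed-form slice expression
-- reversed-second-half ++ first-half (idiomatic; same return value on every input).

-- ===== PORT A =====
-- first while loop: while r >= mid: result += inputString[r]; r -= 1
-- (the index r is always in range here, so pyGetD's default is never used)
def soLoopR (cs : List Char) (mid : Int) (r : Int) (acc : List Char) : List Char :=
  if mid ≤ r then soLoopR cs mid (r - 1) (acc ++ [PySem.List.pyGetD cs r 'a']) else acc
termination_by (r + 1 - mid).toNat
decreasing_by omega

-- second while loop: while l <= r: result += inputString[l]; l += 1
def soLoopL (cs : List Char) (r : Int) (l : Int) (acc : List Char) : List Char :=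
  if l ≤ r then soLoopL cs r (l + 1) (acc ++ [PySem.List.pyGetD cs l 'a']) else acc
termination_by (r + 1 - l).toNat
decreasing_by omega

def special_order (inputString : String) : String :=
  let cs := inputString.toList
  let mid := PySem.Int.floordiv (cs.length : Int) 2
  String.mk (soLoopL cs (mid - 1) 0 (soLoopR cs mid ((cs.length : Int) - 1) []))

-- ===== PORT B =====
-- inputString[mid:][::-1] + inputString[:mid]  (the [::-1] slice? always returns some for step -1)
def special_order_alt (inputString : String) : String :=
  let cs := inputString.toList
  let mid := PySem.Int.floordiv (cs.length : Int) 2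
  String.mk (((PySem.List.slice? (PySem.List.slice cs (some mid) none) none none (-1)).getD [])
    ++ PySem.List.slice cs none (some mid))

-- ===== PRECONDITION & SPEC =====
def Spec_special_order (inputString : String) (out : String) : Prop := out = special_order_alt inputString
instance (inputString : String) (out : String) : Decidable (Spec_special_order inputString out) := by unfold Spec_special_order; infer_instance

-- ===== CLAIM (what is proved, stated in full; the proofs are below) =====
def Claim_equal_special_order : Prop := ∀ (inputString : String), Dom_special_order inputString → Spec_special_order inputString (special_order inputString)

-- ===== LEMMAS AND PROOFS =====

theorem soLoopR_eq (cs : List Char) (mid : Nat) :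
    ∀ (k : Nat) (acc : List Char), mid + k ≤ cs.length →
      soLoopR cs (mid : Int) ((mid : Int) + (k : Int) - 1) acc
        = acc ++ ((cs.take (mid + k)).drop mid).reverse := by
  intro k
  induction k with
  | zero =>
    intro acc h
    rw [soLoopR]
    simp [List.drop_take]
  | succ k ih =>
    intro acc h
    rw [soLoopR]
    have hcond : (mid : Int) ≤ (mid : Int) + ((k : Nat) + 1 : Nat) - 1 := by push_cast; omega
    rw [if_pos hcond]
    have hlt : mid + k < cs.length := by omega
    have harg : (mid : Int) + ((k : Nat) + 1 : Nat) - 1 - 1 = (mid : Int) + (k : Int) - 1 := by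
      push_cast; ring
    have hget : PySem.List.pyGetD cs ((mid : Int) + ((k : Nat) + 1 : Nat) - 1) 'a'
        = cs[mid + k]'hlt := by
      have : ((mid : Int) + ((k : Nat) + 1 : Nat) - 1) = ((mid + k : Nat) : Int) := by
        push_cast; ring
      rw [this, PySem.List.pyGetD_natCast, List.getD_eq_getElem?_getD,
        List.getElem?_eq_getElem hlt]
      rfl
    rw [harg, hget, ih (acc ++ [cs[mid + k]'hlt]) (by omega)]
    have htake : cs.take (mid + (k + 1)) = cs.take (mid + k) ++ [cs[mid + k]'hlt] := by
      have : mid + (k + 1) = (mid + k) + 1 := by ring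
      rw [this, List.take_succ, List.getElem?_eq_getElem hlt]
      rfl
    rw [htake, List.drop_append_of_le_length (by simp; omega), List.reverse_append]
    simp

theorem soLoopL_eq (cs : List Char) (mid : Nat) (hmid : mid ≤ cs.length) :
    ∀ (k l : Nat) (acc : List Char), l + k = mid →
      soLoopL cs ((mid : Int) - 1) (l : Int) acc = acc ++ ((cs.take mid).drop l) := by
  intro k
  induction k with
  | zero =>
    intro l acc h
    rw [soLoopL]
    have : ¬ ((l : Int) ≤ (mid : Int) - 1) := by omega
    rw [if_neg this]
    have : l = mid := by omega
    simp [this, List.drop_take]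
  | succ k ih =>
    intro l acc h
    rw [soLoopL]
    have hcond : (l : Int) ≤ (mid : Int) - 1 := by omega
    rw [if_pos hcond]
    have hlt : l < cs.length := by omega
    have hget : PySem.List.pyGetD cs (l : Int) 'a' = cs[l]'hlt := by
      rw [PySem.List.pyGetD_natCast, List.getD_eq_getElem?_getD, List.getElem?_eq_getElem hlt]
      rfl
    have hl1 : ((l : Int) + 1) = ((l + 1 : Nat) : Int) := by push_cast; ring
    rw [hget, hl1, ih (l + 1) (acc ++ [cs[l]'hlt]) (by omega)]
    have hltm : l < (cs.take mid).length := by simp; omega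
    have hdrop : (cs.take mid).drop l = (cs.take mid)[l]'hltm :: (cs.take mid).drop (l + 1) :=
      List.drop_eq_getElem_cons hltm
    rw [hdrop]
    simp

theorem special_order_eq_closed (s : String) :
    special_order s
      = String.mk ((s.toList.drop (s.toList.length / 2)).reverse
          ++ s.toList.take (s.toList.length / 2)) := by
  unfold special_order
  have hfd : PySem.Int.floordiv ((s.toList.length : Nat) : Int) 2
      = ((s.toList.length / 2 : Nat) : Int) := by
    exact_mod_cast PySem.Int.floordiv_natCast s.toList.length 2
  simp only [hfd]
  set cs := s.toList with hcs
  set m := cs.length / 2 with hm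
  have hR : ((cs.length : Nat) : Int) - 1 = ((m : Int) + ((cs.length - m : Nat) : Int) - 1) := by
    push_cast; omega
  rw [hR, soLoopR_eq cs m (cs.length - m) [] (by omega)]
  have htk : m + (cs.length - m) = cs.length := by omega
  rw [htk, List.take_length]
  rw [show ((0 : Int)) = ((0 : Nat) : Int) by rfl,
    soLoopL_eq cs m (by omega) m 0 ([] ++ (cs.drop m).reverse) (by omega)]
  simp

theorem special_order_alt_eq_closed (s : String) :
    special_order_alt s
      = String.mk ((s.toList.drop (s.toList.length / 2)).reverse
          ++ s.toList.take (s.toList.length / 2)) := by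
  unfold special_order_alt
  have hfd : PySem.Int.floordiv ((s.toList.length : Nat) : Int) 2
      = ((s.toList.length / 2 : Nat) : Int) := by
    exact_mod_cast PySem.Int.floordiv_natCast s.toList.length 2
  simp only [hfd]
  rw [PySem.List.slice_from_natCast, PySem.List.slice_to_natCast,
    PySem.List.slice?_none_none_neg_one]
  rfl

-- ===== VERDICT (by name: the statement is the Claim_ definition above) =====
theorem special_order_spec : Claim_equal_special_order := by
  intro s _
  unfold Spec_special_order
  rw [special_order_eq_closed, special_order_alt_eq_closed]
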